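-- pv_equiv track=rewrite | github.com/macielalves/python3 | SEM13/SEM13T2/SEM13T2Q5.py | esta_ordenado
-- ===== SOURCE A (Python) =====
-- def esta_ordenado(lista):
--     for i in range(len(lista)):
--         # if type(lista[i]) == str:
--         if lista[i].isnumeric():
--             if len(lista[i]) == 1:
--                 lista[i] = '0' + lista[i]
--
--     auxiliar = lista[:]
--     lista.sort()
--
--     return auxiliar == lista
-- ===== SOURCE B (Python) =====
-- def esta_ordenado(lista):
--     lista[:] = ['0' + x if x.isnumeric() and len(x) == 1 else x for x in lista]
--     ordenado = all(a <= b for a, b in zip(lista, lista[1:]))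
--     lista.sort()
--     return ordenado
-- ===== Notes on version B (the rewrite author's own statement) =====
-- stated objective: alternative
-- what changed: B decides sortedness by a single adjacent-pair scan (all(a <= b for a, b in zip(lista, lista[1:]))) instead of A's copy-then-sort-then-compare; the in-place sort is kept only for the mutation side effect.
import Mathlib
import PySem

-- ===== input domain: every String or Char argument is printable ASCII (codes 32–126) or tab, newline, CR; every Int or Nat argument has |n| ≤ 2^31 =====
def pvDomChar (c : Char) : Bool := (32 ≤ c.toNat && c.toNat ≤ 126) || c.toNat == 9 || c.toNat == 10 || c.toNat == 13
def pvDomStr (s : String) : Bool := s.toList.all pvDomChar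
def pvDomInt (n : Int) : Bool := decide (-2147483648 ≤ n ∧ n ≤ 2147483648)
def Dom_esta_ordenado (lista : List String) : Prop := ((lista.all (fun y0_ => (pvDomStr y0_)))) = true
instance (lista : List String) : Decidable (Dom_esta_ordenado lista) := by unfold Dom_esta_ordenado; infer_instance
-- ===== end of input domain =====

-- B decides sortedness by a single adjacent-pair scan instead of A's copy/sort/compare; both Pythons
-- mutate `lista` identically (pad, then in-place sort) — the equivalence proved here is about the return value.

-- ===== PORT A =====
-- str.isnumeric coincides with str.isdigit on the printable-ASCII domain (only '0'..'9' qualify): strIsdigit is exact there.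
def esta_ordenado (lista : List String) : Bool :=
  let lista' := lista.map (fun s => if PySem.Str.strIsdigit s && PySem.Str.len s == 1 then "0" ++ s else s)
  let auxiliar := lista'                                  -- auxiliar = lista[:]
  auxiliar == PySem.List.sorted lista' (fun x => x) false -- lista.sort(); auxiliar == lista

-- ===== PORT B =====
def esta_ordenado_alt (lista : List String) : Bool :=
  -- lista[:] = ['0' + x if x.isnumeric() and len(x) == 1 else x for x in lista]
  let lista' := lista.map (fun x => if PySem.Str.strIsdigit x && PySem.Str.len x == 1 then "0" ++ x else x)
  -- all(a <= b for a, b in zip(lista, lista[1:]))  (the subsequent lista.sort() does not affect the return value)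
  (lista'.zip (PySem.List.slice lista' (some 1) none)).all (fun p => decide (p.1 ≤ p.2))

-- ===== PRECONDITION & SPEC =====
def Spec_esta_ordenado (lista : List String) (out : Bool) : Prop := out = esta_ordenado_alt lista
instance (lista : List String) (out : Bool) : Decidable (Spec_esta_ordenado lista out) := by unfold Spec_esta_ordenado; infer_instance

-- ===== CLAIM (what is proved, stated in full; the proofs are below) =====
def Claim_equal_esta_ordenado : Prop := ∀ (lista : List String), Dom_esta_ordenado lista → Spec_esta_ordenado lista (esta_ordenado lista)

-- ===== LEMMAS AND PROOFS =====

-- the adjacent-pair scan decides "pairwise ≤"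
lemma allZipTail (xs : List String) :
    ((xs.zip xs.tail).all (fun p => decide (p.1 ≤ p.2)) = true) ↔ xs.Pairwise (· ≤ ·) := by
  rw [← List.isChain_iff_pairwise]
  induction xs with
  | nil => simp
  | cons a t ih =>
    cases t with
    | nil => simp
    | cons b u =>
      rw [List.isChain_cons_cons]
      simp only [List.tail_cons, List.zip_cons_cons, List.all_cons, Bool.and_eq_true,
        decide_eq_true_eq] at *
      exact and_congr Iff.rfl ih

-- "the padded list equals its sort" is exactly "the padded list is pairwise ≤"
lemma eq_sorted_iff_pairwise (xs : List String) :
    xs = PySem.List.sorted xs (fun x => x) false ↔ xs.Pairwise (· ≤ ·) := by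
  constructor
  · intro h
    rw [h]
    exact PySem.List.sorted_pairwise xs (fun x => x)
  · intro hp
    exact (PySem.List.sorted_eq_self_of_pairwise xs (fun x => x) hp).symm

lemma key_lemma (xs : List String) :
    (xs == PySem.List.sorted xs (fun x => x) false)
      = (xs.zip (PySem.List.slice xs (some 1) none)).all (fun p => decide (p.1 ≤ p.2)) := by
  rw [PySem.List.slice_from_one, Bool.eq_iff_iff, beq_iff_eq, allZipTail]
  exact eq_sorted_iff_pairwise xs

-- ===== VERDICT (by name: the statement is the Claim_ definition above) =====
theorem esta_ordenado_spec : Claim_equal_esta_ordenado := by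
  intro lista _
  unfold Spec_esta_ordenado esta_ordenado esta_ordenado_alt
  exact key_lemma _
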